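-- pv_equiv track=rewrite | github.com/stianeklund/ARCI | tools/validate_set_to_read_map.py | validate_mappings
-- ===== SOURCE A (Python) =====
-- from typing import Dict, Set, Tuple
--
-- def validate_mappings(json_mappings: Dict[str, str], cpp_mappings: Dict[str, str]) -> Tuple[bool, Set[str], Set[str], Dict[str, Tuple[str, str]]]:
--     """
--     Compare JSON and C++ mappings.
--
--     Returns:
--         (is_valid, missing_in_cpp, extra_in_cpp, mismatched)
--         where mismatched is {cmd: (json_format, cpp_format)}
--     """
--     json_set = set(json_mappings.keys())
--     cpp_set = set(cpp_mappings.keys())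
--
--     missing_in_cpp = json_set - cpp_set
--     extra_in_cpp = cpp_set - json_set
--
--     # Check for format mismatches in commands present in both
--     mismatched = {}
--     for cmd in json_set & cpp_set:
--         if json_mappings[cmd] != cpp_mappings[cmd]:
--             mismatched[cmd] = (json_mappings[cmd], cpp_mappings[cmd])
--
--     is_valid = len(missing_in_cpp) == 0 and len(mismatched) == 0
--
--     return is_valid, missing_in_cpp, extra_in_cpp, mismatched
-- ===== SOURCE B (Python) =====
-- def validate_mappings(json_mappings, cpp_mappings):
--     """Outer-join both dicts into one merged table key -> (json_val|None, cpp_val|None),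
--     then classify each joined row once."""
--     merged = {}
--     for cmd, fmt in json_mappings.items():
--         merged[cmd] = (fmt, None)
--     for cmd, fmt in cpp_mappings.items():
--         if cmd in merged:
--             merged[cmd] = (merged[cmd][0], fmt)
--         else:
--             merged[cmd] = (None, fmt)
--     missing_in_cpp = set()
--     extra_in_cpp = set()
--     mismatched = {}
--     for cmd, (jv, cv) in merged.items():
--         if cv is None:
--             missing_in_cpp.add(cmd)
--         elif jv is None:
--             extra_in_cpp.add(cmd)
--         elif jv != cv:
--             mismatched[cmd] = (jv, cv)
--     is_valid = not missing_in_cpp and not mismatched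
--     return is_valid, missing_in_cpp, extra_in_cpp, mismatched
-- ===== Notes on version B (the rewrite author's own statement) =====
-- stated objective: alternative
-- what changed: Replaces A's set algebra (two set differences plus a loop over the key intersection with dict lookups) by a full outer join: one merged dict key -> (json_val-or-None, cpp_val-or-None) built in two insert passes, then a single classification loop over the joined rows that needs no further lookups.
import Mathlib
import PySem

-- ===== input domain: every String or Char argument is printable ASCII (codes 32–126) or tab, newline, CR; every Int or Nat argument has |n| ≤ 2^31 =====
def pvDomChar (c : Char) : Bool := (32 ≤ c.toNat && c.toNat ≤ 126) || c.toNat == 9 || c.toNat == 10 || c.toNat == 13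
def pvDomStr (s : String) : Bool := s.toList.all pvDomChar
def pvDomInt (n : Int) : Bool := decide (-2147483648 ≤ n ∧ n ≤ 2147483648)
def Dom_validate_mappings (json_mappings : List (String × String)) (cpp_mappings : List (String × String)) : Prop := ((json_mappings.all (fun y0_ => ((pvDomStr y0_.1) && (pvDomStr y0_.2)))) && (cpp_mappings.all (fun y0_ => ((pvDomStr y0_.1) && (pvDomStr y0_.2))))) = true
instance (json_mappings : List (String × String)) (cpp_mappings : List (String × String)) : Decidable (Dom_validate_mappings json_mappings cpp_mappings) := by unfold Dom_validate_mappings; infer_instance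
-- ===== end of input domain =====

-- ===== PORT A =====
-- B replaces A's set algebra by one merged outer-join table classified in a single pass
-- (objective: alternative); equivalence proved for assoc lists with distinct keys (real Python dicts).
def validate_mappings (json_mappings : List (String × String)) (cpp_mappings : List (String × String)) : Bool × List String × List String × (List (String × String × String)) :=
  let jd : PySem.Dict String String := PySem.Dict.mk json_mappings
  let cd : PySem.Dict String String := PySem.Dict.mk cpp_mappings
  let json_set : PySem.Set String := PySem.Set.ofList jd.keys
  let cpp_set : PySem.Set String := PySem.Set.ofList cd.keys
  let missing_in_cpp := PySem.Set.diff json_set cpp_set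
  let extra_in_cpp := PySem.Set.diff cpp_set json_set
  let mismatched : PySem.Dict String (String × String) :=
    (PySem.Set.inter json_set cpp_set).foldl
      (fun m cmd =>
        if jd.getD cmd "" ≠ cd.getD cmd "" then m.insert cmd (jd.getD cmd "", cd.getD cmd "") else m)
      PySem.Dict.empty
  let is_valid := (PySem.Set.len missing_in_cpp == 0) && (mismatched.size == 0)
  (is_valid, missing_in_cpp, extra_in_cpp, mismatched.items)

-- ===== PORT B =====
def validate_mappings_alt (json_mappings : List (String × String)) (cpp_mappings : List (String × String)) : Bool × List String × List String × (List (String × String × String)) :=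
  let merged0 : PySem.Dict String (Option String × Option String) :=
    json_mappings.foldl (fun d kv => d.insert kv.1 (some kv.2, none)) PySem.Dict.empty
  let merged : PySem.Dict String (Option String × Option String) :=
    cpp_mappings.foldl
      (fun d kv =>
        if d.contains kv.1 then d.insert kv.1 ((d.getD kv.1 (none, none)).1, some kv.2)
        else d.insert kv.1 (none, some kv.2))
      merged0
  let res :=
    merged.items.foldl
      (fun (acc : PySem.Set String × PySem.Set String × PySem.Dict String (String × String)) p =>
        match p.2 with
        | (_, none) => (PySem.Set.add acc.1 p.1, acc.2.1, acc.2.2)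
        | (none, some _) => (acc.1, PySem.Set.add acc.2.1 p.1, acc.2.2)
        | (some jv, some cv) =>
          if jv ≠ cv then (acc.1, acc.2.1, acc.2.2.insert p.1 (jv, cv)) else acc)
      (PySem.Set.empty, PySem.Set.empty, PySem.Dict.empty)
  let is_valid := res.1.isEmpty && res.2.2.items.isEmpty
  (is_valid, res.1, res.2.1, res.2.2.items)

-- ===== PRECONDITION & SPEC =====
-- Pre_ restricts to assoc lists with pairwise-distinct keys: a Python dict cannot hold duplicate
-- keys, so lists with duplicates do not represent any input the Python programs can receive.
def Pre_validate_mappings (json_mappings : List (String × String)) (cpp_mappings : List (String × String)) : Prop :=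
  (json_mappings.map Prod.fst).Nodup ∧ (cpp_mappings.map Prod.fst).Nodup
instance (json_mappings : List (String × String)) (cpp_mappings : List (String × String)) : Decidable (Pre_validate_mappings json_mappings cpp_mappings) := by unfold Pre_validate_mappings; infer_instance
def pvWitness_validate_mappings : (List (String × String)) × (List (String × String)) :=
  ([("mov", "a"), ("add", "b")], [("mov", "a"), ("sub", "c")])

def Spec_validate_mappings (json_mappings : List (String × String)) (cpp_mappings : List (String × String)) (out : Bool × List String × List String × (List (String × String × String))) : Prop := out = validate_mappings_alt json_mappings cpp_mappings
instance (json_mappings : List (String × String)) (cpp_mappings : List (String × String)) (out : Bool × List String × List String × (List (String × String × String))) : Decidable (Spec_validate_mappings json_mappings cpp_mappings out) := by unfold Spec_validate_mappings; infer_instance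

-- ===== CLAIM (what is proved, stated in full; the proofs are below) =====
def Claim_equal_validate_mappings : Prop := ∀ (json_mappings : List (String × String)) (cpp_mappings : List (String × String)), Dom_validate_mappings json_mappings cpp_mappings → Pre_validate_mappings json_mappings cpp_mappings → Spec_validate_mappings json_mappings cpp_mappings (validate_mappings json_mappings cpp_mappings)

-- ===== LEMMAS AND PROOFS =====

theorem pv_get?_mk_of_mem (l : List (String × String)) (k v : String) :
    (l.map Prod.fst).Nodup → (k, v) ∈ l → (PySem.Dict.mk l).get? k = some v := by
  induction l with
  | nil => intro _ hm; cases hm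
  | cons p t ih =>
    intro h hm
    rw [PySem.Dict.get?_mk_cons]
    rcases List.mem_cons.mp hm with hm | hm
    · simp [← hm]
    · have hk : k ∈ t.map Prod.fst := List.mem_map.mpr ⟨(k, v), hm, rfl⟩
      have hne : p.1 ≠ k := by
        intro he; exact (List.nodup_cons.mp (by simpa using h)).1 (he ▸ hk)
      simp only [beq_eq_false_iff_ne.mpr hne]
      exact ih (List.nodup_cons.mp (by simpa using h)).2 hm

theorem pv_contains_mk_eq (l : List (String × String)) (k : String) :
    (PySem.Dict.mk l).contains k = (l.map Prod.fst).contains k := by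
  rw [PySem.Dict.contains_mk, Bool.eq_iff_iff]
  simp [List.any_eq_true, List.mem_map]

theorem pv_foldl_not_contains {σ : Type} (l : List (String × String))
    (d : PySem.Dict String String) (F : σ → String → σ) (i : σ) :
    l.foldl (fun m kv => if ¬ d.contains kv.1 then F m kv.1 else m) i =
      ((l.map Prod.fst).filter (fun k => !d.contains k)).foldl F i := by
  induction l generalizing i with
  | nil => rfl
  | cons q t ih =>
    rw [List.map_cons, List.foldl_cons]
    by_cases h : d.contains q.1
    · rw [show List.filter (fun k => !d.contains k) (q.1 :: t.map Prod.fst) =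
          List.filter (fun k => !d.contains k) (t.map Prod.fst) from by simp [h],
        show (if ¬ d.contains q.1 then F i q.1 else i) = i from by simp [h]]
      exact ih i
    · rw [show List.filter (fun k => !d.contains k) (q.1 :: t.map Prod.fst) =
          q.1 :: List.filter (fun k => !d.contains k) (t.map Prod.fst) from by simp [h],
        List.foldl_cons,
        show (if ¬ d.contains q.1 then F i q.1 else i) = F i q.1 from by simp [h]]
      exact ih (F i q.1)

theorem pv_foldl_contains {σ : Type} (l : List (String × String))
    (d : PySem.Dict String String) (F : σ → String → σ) (i : σ) :
    ((l.map Prod.fst).filter (fun k => d.contains k)).foldl F i =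
      l.foldl (fun m kv => if d.contains kv.1 then F m kv.1 else m) i := by
  induction l generalizing i with
  | nil => rfl
  | cons q t ih =>
    rw [List.map_cons, List.foldl_cons]
    by_cases h : d.contains q.1
    · rw [show List.filter (fun k => d.contains k) (q.1 :: t.map Prod.fst) =
          q.1 :: List.filter (fun k => d.contains k) (t.map Prod.fst) from by simp [h],
        List.foldl_cons,
        show (if d.contains q.1 then F i q.1 else i) = F i q.1 from by simp [h]]
      exact ih (F i q.1)
    · rw [show List.filter (fun k => d.contains k) (q.1 :: t.map Prod.fst) =
          List.filter (fun k => d.contains k) (t.map Prod.fst) from by simp [h],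
        show (if d.contains q.1 then F i q.1 else i) = i from by simp [h]]
      exact ih i

theorem pv_merge_items (c : List (String × String))
    (d : PySem.Dict String (Option String × Option String))
    (hc : (c.map Prod.fst).Nodup) (hd : d.keys.Nodup) :
    (c.foldl
      (fun d kv =>
        if d.contains kv.1 then d.insert kv.1 ((d.getD kv.1 (none, none)).1, some kv.2)
        else d.insert kv.1 (none, some kv.2)) d).items
    = d.items.map (fun p =>
        match (PySem.Dict.mk c).get? p.1 with
        | none => p
        | some v => (p.1, (p.2.1, some v)))
      ++ (c.filter (fun kv => !(d.contains kv.1))).map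
          (fun kv => (kv.1, ((none : Option String), some kv.2))) := by
  induction c generalizing d with
  | nil =>
    simp only [List.foldl_nil, List.map_nil, List.filter_nil, List.append_nil]
    have : List.map (fun p => match (PySem.Dict.mk ([] : List (String × String))).get? p.1 with
        | none => p
        | some v => (p.1, (p.2.1, some v))) d.items = List.map id d.items :=
      List.map_congr_left (fun p _ => rfl)
    rw [this, List.map_id]
  | cons kv t ih =>
    obtain ⟨k0, v0⟩ := kv
    have hkt : k0 ∉ t.map Prod.fst := (List.nodup_cons.mp (by simpa using hc)).1
    have hct : (t.map Prod.fst).Nodup := (List.nodup_cons.mp (by simpa using hc)).2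
    have hget_t : (PySem.Dict.mk t).get? k0 = none := by
      rw [PySem.Dict.get?_eq_none_iff_not_mem_keys]
      simpa using hkt
    rw [List.foldl_cons]
    by_cases h : d.contains k0
    · rw [if_pos h]
      have hd' : (d.insert k0 ((d.getD k0 (none, none)).1, some v0)).keys.Nodup := by
        rw [PySem.Dict.keys_insert_of_contains d _ h]; exact hd
      rw [ih _ hct hd']
      have hfil : ∀ (e : PySem.Dict String (Option String × Option String)),
          e.contains k0 = true → e.keys = d.keys →
          True := fun _ _ _ => trivial
      -- filter over t: contains of insert = contains of d on keys ≠ k0, and when = k0 both true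
      have hfilter : t.filter (fun kv' => !((d.insert k0 ((d.getD k0 (none, none)).1, some v0)).contains kv'.1))
          = t.filter (fun kv' => !(d.contains kv'.1)) := by
        apply List.filter_congr
        intro q _
        rw [PySem.Dict.contains_insert]
        by_cases hq : q.1 = k0
        · simp [hq, h]
        · simp [hq]
      have hfilter2 : List.filter (fun kv' => !(d.contains kv'.1)) ((k0, v0) :: t)
          = t.filter (fun kv' => !(d.contains kv'.1)) := by
        simp [List.filter_cons, h]
      rw [hfilter, hfilter2,
        PySem.Dict.items_insert_of_contains d _ h, List.map_map]
      congr 1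
      apply List.map_congr_left
      intro p hp
      by_cases hpk : p.1 = k0
      · have hmem : (k0, p.2) ∈ d.items := by rw [← hpk]; exact hp
        have hgd : d.getD k0 (none, none) = p.2 :=
          PySem.Dict.getD_of_mem_items (h := hmem) (hnd := hd) (d0 := (none, none))
        simp [PySem.Dict.get?_mk_cons, hpk, hget_t, hgd]
      · have hbeq : (p.1 == k0) = false := beq_eq_false_iff_ne.mpr hpk
        have hbeq' : (k0 == p.1) = false := beq_eq_false_iff_ne.mpr (Ne.symm hpk)
        simp [PySem.Dict.get?_mk_cons, hpk, hbeq, hbeq']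
    · rw [if_neg h]
      have hnotmem : k0 ∉ d.keys := by
        intro hm; exact absurd ((PySem.Dict.contains_iff_mem_keys d k0).mpr hm) (by simp [h])
      have hd' : (d.insert k0 ((none : Option String), some v0)).keys.Nodup := by
        rw [PySem.Dict.keys_insert_of_not_contains d _ (by simpa using h)]
        simp only [List.nodup_append]
        refine ⟨hd, by simp, ?_⟩
        intro a ha b hb
        simp only [List.mem_singleton] at hb
        subst hb
        exact fun he => hnotmem (he ▸ ha)
      rw [ih _ hct hd',
        PySem.Dict.items_insert_of_not_contains d _ (by simpa using h)]
      have hfilter : t.filter (fun kv' => !((d.insert k0 ((none : Option String), some v0)).contains kv'.1))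
          = t.filter (fun kv' => !(d.contains kv'.1)) := by
        apply List.filter_congr
        intro q hq
        rw [PySem.Dict.contains_insert]
        have : q.1 ≠ k0 := by
          intro he; exact hkt (he ▸ List.mem_map.mpr ⟨q, hq, rfl⟩)
        simp [this]
      have hfilter2 : List.filter (fun kv' => !(d.contains kv'.1)) ((k0, v0) :: t)
          = (k0, v0) :: t.filter (fun kv' => !(d.contains kv'.1)) := by
        simp [List.filter_cons, h]
      rw [hfilter, hfilter2, List.map_append, List.map_cons]
      have hlast_unused : (fun p => match (PySem.Dict.mk t).get? p.1 with
            | none => p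
            | some v => (p.1, (p.2.1, some v))) (k0, ((none : Option String), some v0))
          = (k0, ((none : Option String), some v0)) := by
        simp [hget_t]
      have hmaps : d.items.map (fun p => match (PySem.Dict.mk t).get? p.1 with
            | none => p
            | some v => (p.1, (p.2.1, some v)))
          = d.items.map (fun p => match (PySem.Dict.mk ((k0, v0) :: t)).get? p.1 with
            | none => p
            | some v => (p.1, (p.2.1, some v))) := by
        apply List.map_congr_left
        intro p hp
        have hpk : p.1 ≠ k0 := by
          intro he
          exact hnotmem (he ▸ PySem.Dict.mem_keys_of_mem_items (h := hp))
        have : (k0 == p.1) = false := beq_eq_false_iff_ne.mpr (Ne.symm hpk)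
        rw [PySem.Dict.get?_mk_cons]
        simp [this]
      simp [hget_t, hmaps, List.append_assoc]

def pvStep3 (acc : PySem.Set String × PySem.Set String × PySem.Dict String (String × String))
    (p : String × Option String × Option String) :
    PySem.Set String × PySem.Set String × PySem.Dict String (String × String) :=
  match p.2 with
  | (_, none) => (PySem.Set.add acc.1 p.1, acc.2.1, acc.2.2)
  | (none, some _) => (acc.1, PySem.Set.add acc.2.1 p.1, acc.2.2)
  | (some jv, some cv) =>
    if jv ≠ cv then (acc.1, acc.2.1, acc.2.2.insert p.1 (jv, cv)) else acc

theorem pv_split1 (cd : PySem.Dict String String) (j : List (String × String)) :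
    ∀ (s1 s2 : PySem.Set String) (dd : PySem.Dict String (String × String)),
    (j.map (fun kv => match cd.get? kv.1 with
       | none => (kv.1, ((some kv.2 : Option String), (none : Option String)))
       | some v => (kv.1, (some kv.2, some v)))).foldl pvStep3 (s1, s2, dd)
    = (j.foldl (fun m kv => if ¬ cd.contains kv.1 then PySem.Set.add m kv.1 else m) s1,
       s2,
       j.foldl (fun mm kv =>
          if ¬ cd.contains kv.1 then mm
          else if kv.2 ≠ cd.getD kv.1 "" then mm.insert kv.1 (kv.2, cd.getD kv.1 "")
          else mm) dd) := by
  induction j with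
  | nil => intro s1 s2 dd; rfl
  | cons kv t ih =>
    intro s1 s2 dd
    simp only [List.map_cons, List.foldl_cons]
    rcases hv : cd.get? kv.1 with _ | v
    · have hcont : cd.contains kv.1 = false := by
        rw [PySem.Dict.contains_eq_isSome_get?, hv]; rfl
      simp only [hv, hcont, pvStep3, Bool.false_eq_true, not_false_iff, if_pos]
      rw [ih]
    · have hcont : cd.contains kv.1 = true := by
        rw [PySem.Dict.contains_eq_isSome_get?, hv]; rfl
      have hgd : cd.getD kv.1 "" = v := by
        rw [PySem.Dict.getD_eq_get?_getD, hv]; rfl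
      simp only [hv, hcont, pvStep3, not_true, if_neg, hgd]
      by_cases hne : kv.2 = v
      · simp only [hne, ne_eq, not_true, if_neg]
        rw [ih]
        simp
      · simp only [ne_eq, hne, not_false_iff, if_pos]
        rw [ih]
        simp

theorem pv_split2 (l : List (String × String)) :
    ∀ (s1 s2 : PySem.Set String) (dd : PySem.Dict String (String × String)),
    (l.map (fun kv => (kv.1, ((none : Option String), some kv.2)))).foldl pvStep3 (s1, s2, dd)
    = (s1, l.foldl (fun s kv => PySem.Set.add s kv.1) s2, dd) := by
  induction l with
  | nil => intro s1 s2 dd; rfl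
  | cons kv t ih =>
    intro s1 s2 dd
    simp only [List.map_cons, List.foldl_cons, pvStep3]
    rw [ih]

-- ===== VERDICT (by name: the statement is the Claim_ definition above) =====
theorem validate_mappings_spec : Claim_equal_validate_mappings := by
  intro j c _dom hpre
  obtain ⟨hj, hc⟩ := hpre
  unfold Spec_validate_mappings
  unfold validate_mappings validate_mappings_alt
  simp only [PySem.Dict.keys]
  rw [PySem.Set.ofList_eq_self_of_nodup _ hj, PySem.Set.ofList_eq_self_of_nodup _ hc]
  -- merged0 items
  have hm0 : (j.foldl (fun d kv => d.insert kv.1 ((some kv.2 : Option String), (none : Option String))) PySem.Dict.empty).items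
      = j.map (fun kv => (kv.1, ((some kv.2 : Option String), (none : Option String)))) := by
    rw [PySem.Dict.items_foldl_insert_fresh j Prod.fst
      (fun kv => ((some kv.2 : Option String), (none : Option String)))
      PySem.Dict.empty (fun a _ => rfl) hj]
    rfl
  set merged0 := j.foldl (fun d kv => d.insert kv.1 ((some kv.2 : Option String), (none : Option String))) PySem.Dict.empty with hm0def
  have hm0keys : merged0.keys = j.map Prod.fst := by
    show merged0.items.map Prod.fst = _
    rw [hm0, List.map_map]
    rfl
  have hm0nodup : merged0.keys.Nodup := by rw [hm0keys]; exact hj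
  have hm0cont : ∀ x, merged0.contains x = (PySem.Dict.mk j).contains x := by
    intro x
    rw [pv_contains_mk_eq, Bool.eq_iff_iff, PySem.Dict.contains_iff_mem_keys, hm0keys]
    simp
  -- merged items = outer join rows
  have hmerged := pv_merge_items c merged0 hc hm0nodup
  rw [hm0] at hmerged
  rw [List.map_map] at hmerged
  -- classification fold
  rw [show (fun (acc : PySem.Set String × PySem.Set String × PySem.Dict String (String × String))
        (p : String × Option String × Option String) =>
        match p.2 with
        | (_, none) => (PySem.Set.add acc.1 p.1, acc.2.1, acc.2.2)
        | (none, some _) => (acc.1, PySem.Set.add acc.2.1 p.1, acc.2.2)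
        | (some jv, some cv) =>
          if jv ≠ cv then (acc.1, acc.2.1, acc.2.2.insert p.1 (jv, cv)) else acc) = pvStep3 from rfl,
    hmerged, List.foldl_append]
  have hL1eq : j.map ((fun p => match (PySem.Dict.mk c).get? p.1 with
        | none => p
        | some v => (p.1, (p.2.1, some v))) ∘ (fun kv => (kv.1, ((some kv.2 : Option String), (none : Option String)))))
      = j.map (fun kv => match (PySem.Dict.mk c).get? kv.1 with
        | none => (kv.1, ((some kv.2 : Option String), (none : Option String)))
        | some v => (kv.1, (some kv.2, some v))) := by
    apply List.map_congr_left
    intro kv _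
    rcases hv : (PySem.Dict.mk c).get? kv.1 with _ | v <;> simp [hv]
  rw [hL1eq, pv_split1, pv_split2]
  -- extra: filter over c then ofList
  have hfq : c.filter (fun kv => !(merged0.contains kv.1))
      = c.filter (fun kv => !((PySem.Dict.mk j).contains kv.1)) := by
    apply List.filter_congr
    intro q _
    rw [hm0cont]
  rw [hfq]
  have hextra :
      (c.filter (fun kv => !((PySem.Dict.mk j).contains kv.1))).foldl
        (fun s kv => PySem.Set.add s kv.1) PySem.Set.empty
      = PySem.Set.diff (c.map Prod.fst) (j.map Prod.fst) := by
    rw [← PySem.Set.update_map_eq_foldl_add, PySem.Set.update_empty]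
    have : (c.filter (fun kv => !((PySem.Dict.mk j).contains kv.1))).map Prod.fst
        = (c.map Prod.fst).filter (fun k => !((PySem.Dict.mk j).contains k)) := by
      rw [List.filter_map]
      rfl
    rw [this, PySem.Set.ofList_eq_self_of_nodup _ (hc.filter _)]
    unfold PySem.Set.diff
    exact List.filter_congr (by intro k _; rw [pv_contains_mk_eq]; rfl)
  rw [hextra]
  -- missing: skip-fold = set difference
  have hmiss :
      j.foldl (fun m kv =>
          if ¬ (PySem.Dict.mk c).contains kv.1 then PySem.Set.add m kv.1 else m)
          PySem.Set.empty =
        PySem.Set.diff (j.map Prod.fst) (c.map Prod.fst) := by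
    rw [pv_foldl_not_contains j (PySem.Dict.mk c) PySem.Set.add PySem.Set.empty,
      show ((j.map Prod.fst).filter
          (fun k => !(PySem.Dict.mk c).contains k)).foldl PySem.Set.add PySem.Set.empty =
        PySem.Set.ofList ((j.map Prod.fst).filter
          (fun k => !(PySem.Dict.mk c).contains k)) from rfl,
      PySem.Set.ofList_eq_self_of_nodup _ (hj.filter _)]
    unfold PySem.Set.diff
    exact List.filter_congr (by intro k _; rw [pv_contains_mk_eq]; rfl)
  -- mismatched: A's loop over the key intersection = B's per-row test
  have hmm :
      List.foldl (fun m cmd =>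
          if (PySem.Dict.mk j).getD cmd "" ≠ (PySem.Dict.mk c).getD cmd "" then
            m.insert cmd ((PySem.Dict.mk j).getD cmd "", (PySem.Dict.mk c).getD cmd "")
          else m) PySem.Dict.empty
        (PySem.Set.inter (j.map Prod.fst) (c.map Prod.fst)) =
      j.foldl (fun mm kv =>
          if ¬ (PySem.Dict.mk c).contains kv.1 then mm
          else if kv.2 ≠ (PySem.Dict.mk c).getD kv.1 "" then
            mm.insert kv.1 (kv.2, (PySem.Dict.mk c).getD kv.1 "")
          else mm) PySem.Dict.empty := by
    have hpred : PySem.Set.inter (j.map Prod.fst) (c.map Prod.fst) =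
        (j.map Prod.fst).filter (fun k => (PySem.Dict.mk c).contains k) := by
      unfold PySem.Set.inter
      exact List.filter_congr (by intro k _; rw [pv_contains_mk_eq]; rfl)
    rw [hpred, pv_foldl_contains j (PySem.Dict.mk c)
      (fun m cmd =>
        if (PySem.Dict.mk j).getD cmd "" ≠ (PySem.Dict.mk c).getD cmd "" then
          m.insert cmd ((PySem.Dict.mk j).getD cmd "", (PySem.Dict.mk c).getD cmd "")
        else m) PySem.Dict.empty]
    refine PySem.List.foldl_congr_mem _ _ _ _ ?_
    intro acc kv hkv
    have hget : (PySem.Dict.mk j).getD kv.1 "" = kv.2 := by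
      have := pv_get?_mk_of_mem j kv.1 kv.2 hj (by simpa using hkv)
      simp [PySem.Dict.getD, this]
    by_cases h1 : (PySem.Dict.mk c).contains kv.1 <;>
      by_cases h2 : kv.2 = (PySem.Dict.mk c).getD kv.1 "" <;> simp [h1, h2, hget]
  rw [hmiss, hmm]
  -- is_valid
  have hvalid : ∀ (s : PySem.Set String) (mm : PySem.Dict String (String × String)),
      ((PySem.Set.len s == 0) && (mm.size == 0)) = (s.isEmpty && mm.items.isEmpty) := by
    intro s mm
    obtain ⟨l⟩ := mm
    cases s <;> cases l <;> first
      | (simp [PySem.Set.len, PySem.Dict.size]; omega)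
      | simp [PySem.Set.len, PySem.Dict.size]
  exact congr (congrArg Prod.mk (hvalid _ _)) rfl
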